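-- pv_equiv track=rewrite | github.com/ozbzer/syllabus-parser | app.py | prefer_evaluation_dates
-- ===== SOURCE A (Python) =====
-- def prefer_evaluation_dates(calendar_items):
--     final = {}
--     for item in calendar_items:
--         key = item.get("title", "").strip().lower()
--         if not key:
--             continue
--
--         # If same item appears twice → prefer evaluation
--         if key not in final or item.get("source_section") == "evaluation":
--             final[key] = item
--
--     return list(final.values())
-- ===== SOURCE B (Python) =====
-- def prefer_evaluation_dates(calendar_items):
--     # Pass 1: group items by normalized title, preserving first-occurrence key order.
--     groups = {}
--     for item in calendar_items:
--         key = item.get("title", "").strip().lower()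
--         if key:
--             groups.setdefault(key, []).append(item)
--     # Pass 2: for each group pick the last 'evaluation' item, else the first item.
--     result = []
--     for grp in groups.values():
--         chosen = grp[0]
--         for it in grp:
--             if it.get("source_section") == "evaluation":
--                 chosen = it
--         result.append(chosen)
--     return result
-- ===== Notes on version B (the rewrite author's own statement) =====
-- stated objective: alternative
-- what changed: A's single greedy overwrite pass over a dict is replaced by a two-pass decomposition: first build an ordered group-by-normalized-title index, then select per group the last 'evaluation' item (else the first).
import Mathlib
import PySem

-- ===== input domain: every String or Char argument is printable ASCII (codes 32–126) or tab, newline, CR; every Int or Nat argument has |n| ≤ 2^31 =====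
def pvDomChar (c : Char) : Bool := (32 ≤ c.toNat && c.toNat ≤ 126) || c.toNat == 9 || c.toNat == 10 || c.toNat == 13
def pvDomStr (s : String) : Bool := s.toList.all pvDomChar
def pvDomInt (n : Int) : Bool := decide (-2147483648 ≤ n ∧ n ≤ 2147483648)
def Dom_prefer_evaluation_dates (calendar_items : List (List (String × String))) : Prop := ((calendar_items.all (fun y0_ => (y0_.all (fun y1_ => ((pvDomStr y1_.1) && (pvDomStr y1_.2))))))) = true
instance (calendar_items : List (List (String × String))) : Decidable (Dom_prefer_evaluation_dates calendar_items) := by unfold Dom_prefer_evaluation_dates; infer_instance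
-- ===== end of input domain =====

-- B replaces A's single greedy overwrite pass by a group-by-key index built first,
-- then a per-group selection pass (last 'evaluation' item, else the first item);
-- objective: alternative decomposition, same asymptotic cost.

-- ===== PORT A =====
-- shared helpers (both Pythons call item.get("title","") etc. identically):
-- item.get("title", "").strip().lower()
def pvKeyOf (item : List (String × String)) : String :=
  PySem.Str.lower (PySem.Str.strip ((PySem.Dict.mk item).getD "title" ""))

-- item.get("source_section") == "evaluation"
def pvIsEval (item : List (String × String)) : Bool :=
  (PySem.Dict.mk item).get? "source_section" == some "evaluation"

def prefer_evaluation_dates (calendar_items : List (List (String × String))) : List (List (String × String)) :=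
  let final := calendar_items.foldl (fun final item =>
    let key := pvKeyOf item
    if key = "" then final
    else if (!(final.contains key)) || pvIsEval item then final.insert key item
    else final) PySem.Dict.empty
  final.values

-- ===== PORT B =====
-- chosen = grp[0]; for it in grp: if it.get("source_section") == "evaluation": chosen = it
def pvSelect (grp : List (List (String × String))) : List (String × String) :=
  grp.foldl (fun chosen it => if pvIsEval it then it else chosen)
    ((PySem.List.pyGet? grp 0).getD [])

def prefer_evaluation_dates_alt (calendar_items : List (List (String × String))) : List (List (String × String)) :=
  -- pass 1: groups.setdefault(key, []).append(item)  ≡  groups[key] = groups.get(key, []) + [item]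
  let groups := calendar_items.foldl (fun groups item =>
    let key := pvKeyOf item
    if key = "" then groups
    else groups.modify key [] (fun l => l ++ [item])) PySem.Dict.empty
  -- pass 2: pick the preferred item of each group
  groups.values.map pvSelect

-- ===== PRECONDITION & SPEC =====
def Spec_prefer_evaluation_dates (calendar_items : List (List (String × String))) (out : List (List (String × String))) : Prop := out = prefer_evaluation_dates_alt calendar_items
instance (calendar_items : List (List (String × String))) (out : List (List (String × String))) : Decidable (Spec_prefer_evaluation_dates calendar_items out) := by unfold Spec_prefer_evaluation_dates; infer_instance

-- ===== CLAIM (what is proved, stated in full; the proofs are below) =====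
def Claim_equal_prefer_evaluation_dates : Prop := ∀ (calendar_items : List (List (String × String))), Dom_prefer_evaluation_dates calendar_items → Spec_prefer_evaluation_dates calendar_items (prefer_evaluation_dates calendar_items)

-- ===== LEMMAS AND PROOFS =====

theorem pvSelect_cons (h : List (String × String)) (t : List (List (String × String))) :
    pvSelect (h :: t) = t.foldl (fun chosen it => if pvIsEval it then it else chosen) h := by
  simp [pvSelect, PySem.List.pyGet?, PySem.List.pyIdx?]

theorem pvSelect_singleton (it : List (String × String)) : pvSelect [it] = it := by
  simp [pvSelect_cons]

theorem pvSelect_append_singleton (g : List (List (String × String)))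
    (hg : g ≠ []) (it : List (String × String)) :
    pvSelect (g ++ [it]) = if pvIsEval it then it else pvSelect g := by
  obtain ⟨h, t, rfl⟩ := List.exists_cons_of_ne_nil hg
  rw [List.cons_append, pvSelect_cons, pvSelect_cons, List.foldl_append]
  simp

-- the loop invariant: A's dict holds, per key, the selection of B's group list
theorem pv_inv (l : List (List (String × String)))
    (final : PySem.Dict String (List (String × String)))
    (groups : PySem.Dict String (List (List (String × String))))
    (hI : final.items = groups.items.map (fun p => (p.1, pvSelect p.2)))
    (hne : ∀ p ∈ groups.items, p.2 ≠ [])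
    (hnd : groups.keys.Nodup) :
    (l.foldl (fun final item =>
        let key := pvKeyOf item
        if key = "" then final
        else if (!(final.contains key)) || pvIsEval item then final.insert key item
        else final) final).items
    = ((l.foldl (fun groups item =>
        let key := pvKeyOf item
        if key = "" then groups
        else groups.modify key [] (fun l => l ++ [item])) groups).items).map
        (fun p => (p.1, pvSelect p.2)) := by
  induction l generalizing final groups with
  | nil => simpa using hI
  | cons item rest ih =>
    simp only [List.foldl_cons]
    by_cases hk : pvKeyOf item = ""
    · simp only [hk]
      exact ih final groups hI hne hnd
    · simp only [if_neg hk]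
      have hkeys : final.keys = groups.keys := by
        simp only [PySem.Dict.keys, hI, List.map_map]
        rfl
      have hcont : final.contains (pvKeyOf item) = groups.contains (pvKeyOf item) := by
        rw [PySem.Dict.contains_eq_decide_mem_keys, PySem.Dict.contains_eq_decide_mem_keys, hkeys]
      by_cases hc : groups.contains (pvKeyOf item) = true
      · -- existing group g
        have hmemk : pvKeyOf item ∈ groups.keys := (PySem.Dict.contains_iff_mem_keys _ _).mp hc
        obtain ⟨g, hg⟩ : ∃ g, groups.get? (pvKeyOf item) = some g := by
          rcases h : groups.get? (pvKeyOf item) with _ | g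
          · exact absurd ((PySem.Dict.get?_eq_none_iff_not_mem_keys _ _).mp h) (by simpa using hmemk)
          · exact ⟨g, rfl⟩
        have hgmem : (pvKeyOf item, g) ∈ groups.items :=
          (PySem.Dict.get?_eq_some_iff_mem_items _ _ _ hnd).mp hg
        have hgne : g ≠ [] := hne _ hgmem
        have hgetD : groups.getD (pvKeyOf item) [] = g :=
          PySem.Dict.getD_of_mem_items _ hgmem hnd []
        have hmod : groups.modify (pvKeyOf item) [] (fun l => l ++ [item])
            = groups.insert (pvKeyOf item) (g ++ [item]) := by
          simp [PySem.Dict.modify, hgetD]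
        have hitemsG : (groups.insert (pvKeyOf item) (g ++ [item])).items
            = groups.items.map (fun p => if (p.1 == pvKeyOf item) = true then (pvKeyOf item, g ++ [item]) else p) :=
          PySem.Dict.items_insert_of_contains _ _ hc
        -- facts about the new groups state for the recursive call
        have hne' : ∀ p ∈ (groups.modify (pvKeyOf item) [] (fun l => l ++ [item])).items, p.2 ≠ [] := by
          rw [hmod, hitemsG]
          intro p hp
          obtain ⟨q, hq, hqe⟩ := List.mem_map.mp hp
          by_cases hq1 : (q.1 == pvKeyOf item) = true
          · rw [if_pos hq1] at hqe; subst hqe; simp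
          · rw [if_neg hq1] at hqe; subst hqe; exact hne _ hq
        have hnd' : (groups.modify (pvKeyOf item) [] (fun l => l ++ [item])).keys.Nodup := by
          rw [hmod]
          exact PySem.Dict.nodup_keys_insert _ _ _ hnd
        by_cases he : pvIsEval item = true
        · -- A inserts; selection of the extended group is the new item
          have hcondA : ((!(final.contains (pvKeyOf item))) || pvIsEval item) = true := by
            simp [he]
          rw [if_pos hcondA]
          refine ih _ _ ?_ hne' hnd'
          rw [hmod, PySem.Dict.items_insert_of_contains _ _ (by rw [hcont]; exact hc), hitemsG, hI,
            List.map_map, List.map_map]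
          apply List.map_congr_left
          intro p hp
          by_cases hp1 : (p.1 == pvKeyOf item) = true
          · have h1 : p.1 = pvKeyOf item := by simpa using hp1
            simp [h1, pvSelect_append_singleton _ hgne, he]
          · have h1 : p.1 ≠ pvKeyOf item := by simpa using hp1
            simp [h1]
        · -- A keeps its value; selection of the extended group is unchanged
          have hcondA : ((!(final.contains (pvKeyOf item))) || pvIsEval item) = false := by
            simp [he, hcont, hc]
          rw [if_neg (by simp [hcondA])]
          refine ih _ _ ?_ hne' hnd'
          rw [hmod, hitemsG, hI, List.map_map]
          apply List.map_congr_left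
          intro p hp
          by_cases hp1 : (p.1 == pvKeyOf item) = true
          · have h1 : p.1 = pvKeyOf item := by simpa using hp1
            have h2 : groups.get? p.1 = some p.2 :=
              (PySem.Dict.get?_eq_some_iff_mem_items _ _ _ hnd).mpr hp
            rw [h1, hg] at h2
            have hpg : p.2 = g := by simpa using h2.symm
            simp [h1, hpg, pvSelect_append_singleton _ hgne, he]
          · have h1 : p.1 ≠ pvKeyOf item := by simpa using hp1
            simp [h1]
      · -- fresh key: both append
        have hcf : final.contains (pvKeyOf item) = false := by
          rw [hcont]; simpa using hc
        have hcondA : ((!(final.contains (pvKeyOf item))) || pvIsEval item) = true := by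
          simp [hcf]
        rw [if_pos hcondA]
        have hgetD : groups.getD (pvKeyOf item) [] = [] :=
          PySem.Dict.getD_of_not_contains _ [] (by simpa using hc)
        have hmod : groups.modify (pvKeyOf item) [] (fun l => l ++ [item])
            = groups.insert (pvKeyOf item) [item] := by
          simp [PySem.Dict.modify, hgetD]
        have hitemsG : (groups.insert (pvKeyOf item) [item]).items
            = groups.items ++ [(pvKeyOf item, [item])] :=
          PySem.Dict.items_insert_of_not_contains _ _ (by simpa using hc)
        refine ih _ _ ?_ ?_ ?_
        · rw [PySem.Dict.items_insert_of_not_contains _ _ hcf, hmod, hitemsG, hI]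
          simp [pvSelect_singleton]
        · rw [hmod, hitemsG]
          intro p hp
          rcases List.mem_append.mp hp with h | h
          · exact hne _ h
          · simp only [List.mem_singleton] at h; subst h; simp
        · rw [hmod]
          exact PySem.Dict.nodup_keys_insert _ _ _ hnd

-- ===== VERDICT (by name: the statement is the Claim_ definition above) =====
theorem prefer_evaluation_dates_spec : Claim_equal_prefer_evaluation_dates := by
  intro calendar_items _
  unfold Spec_prefer_evaluation_dates prefer_evaluation_dates prefer_evaluation_dates_alt
  have h := pv_inv calendar_items PySem.Dict.empty PySem.Dict.empty
    (by simp [PySem.Dict.empty]) (by simp [PySem.Dict.empty]) (by simp [PySem.Dict.empty])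
  simp only [PySem.Dict.values, h, List.map_map]
  rfl
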